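-- pv_equiv track=rewrite | github.com/adrianoporzia/Universita | Algoritmi/sizeblock.py | createoracle
-- ===== SOURCE A (Python) =====
-- def createoracle(A):
--     Y = [0] * (len(A) - 1)
--     n = len(A) - 1
--     if A[0] == 0:
--         Y[0] += 1
--     for i in range(1, n):
--         if A[i] == 0:
--             Y[i] = Y[i - 1] + 1
--         else:
--             Y[i] = 0
--
--     if A[n] == 0:
--         Y[n] = 0
--     i = n - 1
--     for i in range(len(A)-2, -1, -1):
--         if A[i] == 1:
--             continue
--         elif A[i] == 0 and A[i + 1] == 0:
--             Y[i] = Y[i + 1]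
--     return Y
-- ===== SOURCE B (Python) =====
-- def createoracle(A):
--     n = len(A) - 1
--
--     def run_end(j):
--         # first index k >= j with k == n or A[k] != 0
--         while j < n and A[j] == 0:
--             j += 1
--         return j
--
--     def run_start(j):
--         # first index of the zero run containing j
--         while j > 0 and A[j - 1] == 0:
--             j -= 1
--         return j
--
--     return [0 if A[i] != 0 else run_end(i) - run_start(i) for i in range(n)]
-- ===== Notes on version B (the rewrite author's own statement) =====
-- stated objective: alternative
-- what changed: A builds the oracle with two stateful index passes (forward zero-run counting, then backward propagation of run sizes); B computes each entry independently by scanning from that index to both ends of its zero run, with no shared mutable array.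
import Mathlib
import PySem

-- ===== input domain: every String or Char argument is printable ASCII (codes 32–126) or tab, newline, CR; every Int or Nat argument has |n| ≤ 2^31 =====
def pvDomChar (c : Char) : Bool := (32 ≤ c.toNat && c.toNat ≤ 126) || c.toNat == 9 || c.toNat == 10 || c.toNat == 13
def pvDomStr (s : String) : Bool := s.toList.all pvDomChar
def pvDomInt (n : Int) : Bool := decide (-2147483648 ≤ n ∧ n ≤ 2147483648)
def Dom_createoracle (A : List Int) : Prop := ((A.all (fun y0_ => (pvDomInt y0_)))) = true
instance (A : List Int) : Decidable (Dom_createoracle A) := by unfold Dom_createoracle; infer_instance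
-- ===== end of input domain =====

-- B replaces A's two stateful index passes by an independent per-index zero-run scan (alternative
-- decomposition, not claimed faster). Equivalence is about the return value on inputs where A returns.

-- ===== PORT A =====
-- Literal port of A: Y = [0]*(len(A)-1); forward pass over range(1,n) counting consecutive zeros;
-- trailing check; backward pass over range(len(A)-2,-1,-1) propagating run sizes.
-- Reads/writes Y[i], A[i] use the total pyGetD/pySetD forms: indices are in range wherever
-- Pre_createoracle holds (outside it Python raises IndexError).
def createoracle (A : List Int) : List Int :=
  let n : Int := (A.length : Int) - 1
  let Y : List Int := List.replicate (A.length - 1) 0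
  let Y := if PySem.List.pyGetD A 0 0 = 0 then
             PySem.List.pySetD Y 0 (PySem.List.pyGetD Y 0 0 + 1) else Y
  let Y := (PySem.List.pyRange 1 n 1).foldl (fun Y i =>
      if PySem.List.pyGetD A i 0 = 0 then
        PySem.List.pySetD Y i (PySem.List.pyGetD Y (i - 1) 0 + 1)
      else PySem.List.pySetD Y i 0) Y
  let Y := if PySem.List.pyGetD A n 0 = 0 then PySem.List.pySetD Y n 0 else Y
  let Y := (PySem.List.pyRange ((A.length : Int) - 2) (-1) (-1)).foldl (fun Y i =>
      if PySem.List.pyGetD A i 0 = 1 then Y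
      else if PySem.List.pyGetD A i 0 = 0 ∧ PySem.List.pyGetD A (i + 1) 0 = 0 then
        PySem.List.pySetD Y i (PySem.List.pyGetD Y (i + 1) 0)
      else Y) Y
  Y

-- ===== PORT B =====
-- first index k ≥ j with k = n or A[k] ≠ 0  (Source B's run_end while-loop)
def runEnd (A : List Int) (n j : Nat) : Nat :=
  if h : j < n ∧ A.getD j 0 = 0 then runEnd A n (j + 1) else j
termination_by n - j
decreasing_by omega

-- first index of the zero run containing j  (Source B's run_start while-loop)
def runStart (A : List Int) (j : Nat) : Nat :=
  if h : 0 < j ∧ A.getD (j - 1) 0 = 0 then runStart A (j - 1) else j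
termination_by j
decreasing_by omega

def createoracle_alt (A : List Int) : List Int :=
  let n := A.length - 1
  (List.range n).map (fun i =>
    if A.getD i 0 ≠ 0 then 0 else (runEnd A n i : Int) - (runStart A i : Int))

-- ===== PRECONDITION & SPEC =====
-- Pre_ excludes exactly the inputs where Python A raises IndexError: the empty list
-- (unconditional A[0] read) and lists ending in 0 (the write Y[n] is past the end of Y).
def Pre_createoracle (A : List Int) : Prop := A ≠ [] ∧ A.getLast? ≠ some 0
instance (A : List Int) : Decidable (Pre_createoracle A) := by
  unfold Pre_createoracle; infer_instance

def pvWitness_createoracle : List Int := [0, 0, 1, 0, 2]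

def Spec_createoracle (A : List Int) (out : List Int) : Prop := out = createoracle_alt A
instance (A : List Int) (out : List Int) : Decidable (Spec_createoracle A out) := by
  unfold Spec_createoracle; infer_instance

-- ===== CLAIM (what is proved, stated in full; the proofs are below) =====
def Claim_equal_createoracle : Prop := ∀ (A : List Int), Dom_createoracle A →
  Pre_createoracle A → Spec_createoracle A (createoracle A)

-- ===== LEMMAS AND PROOFS =====

-- value of A's forward pass at index i (count of consecutive zeros ending at i)
def fwd (A : List Int) : Nat → Int
  | 0 => if A.getD 0 0 = 0 then 1 else 0
  | (i + 1) => if A.getD (i + 1) 0 = 0 then fwd A i + 1 else 0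

-- value of A's backward pass at index i (run size propagated from the right)
def bwd (A : List Int) (n i : Nat) : Int :=
  if _h : i + 1 < n then
    if A.getD i 0 = 0 ∧ A.getD (i + 1) 0 = 0 then bwd A n (i + 1) else fwd A i
  else fwd A i
termination_by n - i
decreasing_by omega

-- Y after the forward pass has processed indices 1..m
def mixF (A : List Int) (nn m : Nat) : List Int :=
  (List.range nn).map (fun j => if j ≤ m then fwd A j else 0)

-- Y after the backward pass has processed indices nn-1 down to i
def mixB (A : List Int) (nn i : Nat) : List Int :=
  (List.range nn).map (fun j => if i ≤ j then bwd A nn j else fwd A j)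

theorem fwd_of_ne (A : List Int) (i : Nat) (h : A.getD i 0 ≠ 0) : fwd A i = 0 := by
  cases i with
  | zero =>
    simp only [fwd]
    rw [if_neg h]
  | succ n =>
    simp only [fwd]
    rw [if_neg h]

theorem bwd_of_ne (A : List Int) (nn i : Nat) (h : A.getD i 0 ≠ 0) :
    bwd A nn i = 0 := by
  by_cases hd : i + 1 < nn
  · rw [bwd, dif_pos hd, if_neg (fun hc => h hc.1)]
    exact fwd_of_ne A i h
  · rw [bwd, dif_neg hd]
    exact fwd_of_ne A i h


theorem mixB_top (A : List Int) (nn : Nat) :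
    mixB A nn nn = (List.range nn).map (fwd A) := by
  unfold mixB
  refine List.map_congr_left (fun j hj => ?_)
  rw [List.mem_range] at hj
  rw [if_neg (by omega)]

theorem mixB_step_id (A : List Int) (nn i : Nat) (h : bwd A nn i = fwd A i) :
    mixB A nn (i + 1) = mixB A nn i := by
  unfold mixB
  refine List.map_congr_left (fun j hj => ?_)
  by_cases hji : j = i
  · rw [hji, if_neg (by omega), if_pos (le_refl i), h]
  · split_ifs <;> first | rfl | omega

theorem pySetD_zero_eq (xs : List Int) (v : Int) :
    PySem.List.pySetD xs 0 v = xs.set 0 v := by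
  have h := PySem.List.pySetD_of_nonneg (xs := xs) (v := v) (i := 0) (by norm_num)
  exact h

-- Y after the "Y[0] += 1" step equals mixF A nn 0
theorem phase1 (A : List Int) (nn : Nat) (hlen : A.length = nn + 1) :
    (if PySem.List.pyGetD A 0 0 = 0 then
       PySem.List.pySetD (List.replicate (A.length - 1) 0) 0
         (PySem.List.pyGetD (List.replicate (A.length - 1) 0) 0 0 + 1)
     else List.replicate (A.length - 1) 0) = mixF A nn 0 := by
  have hrep : A.length - 1 = nn := by omega
  rw [hrep]
  rw [pySetD_zero_eq]
  rw [PySem.List.pyGetD_zero, PySem.List.pyGetD_zero]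
  by_cases h0 : A.getD 0 0 = 0
  · rw [if_pos h0]
    apply List.ext_getElem
    · simp [mixF]
    · intro j hj1 hj2
      simp only [mixF, List.getElem_set, List.getElem_map, List.getElem_range,
        List.getElem_replicate, List.length_set, List.length_replicate] at *
      rcases Nat.eq_zero_or_pos j with hj0 | hj0
      · subst hj0
        rw [if_pos rfl, if_pos (le_refl 0)]
        have hz : (List.replicate nn (0 : Int)).getD 0 0 = 0 := by
          rcases Nat.eq_zero_or_pos nn with h | h
          · subst h; rfl
          · simp [List.getD_eq_getElem?_getD, h]
        rw [hz]
        simp only [fwd]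
        rw [if_pos h0]
        norm_num
      · rw [if_neg (by omega), if_neg (by omega)]
  · rw [if_neg h0]
    apply List.ext_getElem
    · simp [mixF]
    · intro j hj1 hj2
      simp only [mixF, List.getElem_map, List.getElem_range, List.getElem_replicate]
      rcases Nat.eq_zero_or_pos j with hj0 | hj0
      · subst hj0
        rw [if_pos (le_refl 0)]
        simp only [fwd]
        rw [if_neg h0]
      · rw [if_neg (by omega)]

-- the forward pass fold computes the consecutive-zero counts
theorem fold_fwd (A : List Int) (nn : Nat) (m : Nat) (hm : m < nn) :
    (PySem.List.pyRange 1 ((m : Int) + 1) 1).foldl (fun Y i =>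
      if PySem.List.pyGetD A i 0 = 0 then
        PySem.List.pySetD Y i (PySem.List.pyGetD Y (i - 1) 0 + 1)
      else PySem.List.pySetD Y i 0) (mixF A nn 0) = mixF A nn m := by
  induction m with
  | zero =>
    rw [show ((0 : Nat) : Int) + 1 = 1 by norm_num, PySem.List.pyRange_one_eq_nil le_rfl]
    rfl
  | succ m ih =>
    have hm' : m < nn := by omega
    rw [show (((m + 1 : Nat) : Int) + 1) = ((m : Int) + 1) + 1 by push_cast; ring]
    rw [PySem.List.pyRange_one_succ_right (by omega), List.foldl_append]
    rw [ih hm']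
    simp only [List.foldl_cons, List.foldl_nil]
    rw [show ((m : Int) + 1) = ((m + 1 : Nat) : Int) by push_cast; ring]
    rw [show (((m + 1 : Nat) : Int) - 1) = ((m : Nat) : Int) by push_cast; ring]
    simp only [PySem.List.pyGetD_natCast, PySem.List.pySetD_natCast]
    have hgm : (mixF A nn m).getD m 0 = fwd A m := by
      simp [mixF, List.getD_eq_getElem?_getD, hm']
    by_cases h : A.getD (m + 1) 0 = 0
    · rw [if_pos h, hgm]
      apply List.ext_getElem
      · simp [mixF]
      · intro j hj1 hj2
        simp only [mixF, List.length_map, List.length_range] at hj2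
        simp only [mixF, List.getElem_set, List.getElem_map, List.getElem_range,
          List.length_map, List.length_range]
        by_cases hjm : j = m + 1
        · subst hjm
          rw [if_pos rfl, if_pos (le_refl _)]
          simp only [fwd]
          rw [if_pos h]
        · split_ifs <;> first | rfl | omega
    · rw [if_neg h]
      apply List.ext_getElem
      · simp [mixF]
      · intro j hj1 hj2
        simp only [mixF, List.length_map, List.length_range] at hj2
        simp only [mixF, List.getElem_set, List.getElem_map, List.getElem_range,
          List.length_map, List.length_range]
        by_cases hjm : j = m + 1
        · subst hjm
          rw [if_pos rfl, if_pos (le_refl _)]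
          rw [fwd_of_ne A (m + 1) h]
        · split_ifs <;> first | rfl | omega

-- the backward pass fold propagates run sizes
theorem fold_bwd (A : List Int) (nn : Nat) (hlast : A.getD nn 0 ≠ 0) :
    ∀ (d i : Nat), i + d = nn →
    ((PySem.List.pyRange (i : Int) (nn : Int) 1).reverse).foldl (fun Y i =>
      if PySem.List.pyGetD A i 0 = 1 then Y
      else if PySem.List.pyGetD A i 0 = 0 ∧ PySem.List.pyGetD A (i + 1) 0 = 0 then
        PySem.List.pySetD Y i (PySem.List.pyGetD Y (i + 1) 0)
      else Y) ((List.range nn).map (fwd A)) = mixB A nn i := by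
  intro d
  induction d with
  | zero =>
    intro i hi
    have hieq : i = nn := by omega
    rw [hieq]
    rw [PySem.List.pyRange_one_eq_nil le_rfl]
    simp only [List.reverse_nil, List.foldl_nil]
    exact (mixB_top A nn).symm
  | succ d ih =>
    intro i hi
    have hilt : i < nn := by omega
    rw [PySem.List.pyRange_one_cons (by exact_mod_cast hilt), List.reverse_cons,
      List.foldl_append]
    rw [show ((i : Int) + 1) = ((i + 1 : Nat) : Int) by push_cast; ring]
    rw [ih (i + 1) (by omega)]
    simp only [List.foldl_cons, List.foldl_nil]
    rw [show ((i : Int) + 1) = ((i + 1 : Nat) : Int) by push_cast; ring]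
    simp only [PySem.List.pyGetD_natCast, PySem.List.pySetD_natCast]
    by_cases h1 : A.getD i 0 = 1
    · rw [if_pos h1]
      apply mixB_step_id
      rw [bwd]
      have hc : ¬(A.getD i 0 = 0 ∧ A.getD (i + 1) 0 = 0) := by
        intro hc
        rw [h1] at hc
        exact absurd hc.1 (by norm_num)
      by_cases hd : i + 1 < nn
      · rw [dif_pos hd, if_neg hc]
      · rw [dif_neg hd]
    · rw [if_neg h1]
      by_cases h2 : A.getD i 0 = 0 ∧ A.getD (i + 1) 0 = 0
      · rw [if_pos h2]
        have hi1 : i + 1 < nn := by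
          rcases Nat.lt_or_ge (i + 1) nn with h | h
          · exact h
          · exfalso
            have : i + 1 = nn := by omega
            exact hlast (this ▸ h2.2)
        have hget : (mixB A nn (i + 1)).getD (i + 1) 0 = bwd A nn (i + 1) := by
          simp [mixB, List.getD_eq_getElem?_getD, hi1]
        rw [hget]
        have hbwd : bwd A nn i = bwd A nn (i + 1) := by
          rw [bwd, dif_pos hi1, if_pos h2]
        apply List.ext_getElem
        · simp [mixB]
        · intro j hj1 hj2
          simp only [mixB, List.length_map, List.length_range] at hj2
          simp only [mixB, List.getElem_set, List.getElem_map, List.getElem_range,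
            List.length_map, List.length_range]
          by_cases hji : i = j
          · rw [if_pos hji, if_pos (by omega)]
            rw [← hji, ← hbwd]
          · split_ifs <;> first | rfl | omega
      · rw [if_neg h2]
        apply mixB_step_id
        rw [bwd]
        by_cases hd : i + 1 < nn
        · rw [dif_pos hd, if_neg h2]
        · rw [dif_neg hd]

-- B's left run boundary against A's forward pass
theorem fwd_run (A : List Int) : ∀ (i : Nat), A.getD i 0 = 0 →
    fwd A i = (i : Int) + 1 - (runStart A i : Int) := by
  intro i
  induction i with
  | zero =>
    intro h
    rw [runStart, dif_neg (by omega)]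
    simp only [fwd]
    rw [if_pos h]
    norm_num
  | succ i ih =>
    intro h
    have hfs : fwd A (i + 1) = fwd A i + 1 := by
      simp only [fwd]; rw [if_pos h]
    by_cases hA : A.getD i 0 = 0
    · have hrs : runStart A (i + 1) = runStart A i := by
        rw [runStart, dif_pos ⟨Nat.succ_pos i, by simpa using hA⟩, Nat.add_sub_cancel]
      rw [hfs, hrs, ih hA]
      push_cast
      ring
    · have hrs : runStart A (i + 1) = i + 1 := by
        rw [runStart, dif_neg (by rw [Nat.add_sub_cancel]; exact fun hc => hA hc.2)]
      rw [hfs, hrs, fwd_of_ne A i hA]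
      push_cast
      ring

-- B's run-size value against A's backward pass
theorem bwd_run (A : List Int) (nn : Nat) (hlast : A.getD nn 0 ≠ 0) :
    ∀ (d i : Nat), i + d = nn → i < nn → A.getD i 0 = 0 →
    bwd A nn i = (runEnd A nn i : Int) - (runStart A i : Int) := by
  intro d
  induction d with
  | zero =>
    intro i hi hilt _
    omega
  | succ d ih =>
    intro i hi hilt h0
    rw [bwd]
    by_cases hi1 : i + 1 < nn
    · rw [dif_pos hi1]
      by_cases hn : A.getD (i + 1) 0 = 0
      · rw [if_pos ⟨h0, hn⟩]
        rw [ih (i + 1) (by omega) hi1 hn]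
        have e1 : runEnd A nn i = runEnd A nn (i + 1) := by
          conv_lhs => rw [runEnd]
          rw [dif_pos ⟨hilt, h0⟩]
        have e2 : runStart A (i + 1) = runStart A i := by
          conv_lhs => rw [runStart]
          rw [dif_pos ⟨Nat.succ_pos i, by simpa using h0⟩, Nat.add_sub_cancel]
        rw [e1, e2]
      · rw [if_neg (by tauto)]
        rw [fwd_run A i h0]
        have e1 : runEnd A nn i = i + 1 := by
          rw [runEnd, dif_pos ⟨hilt, h0⟩, runEnd, dif_neg (by tauto)]
        rw [e1]
        push_cast
        ring
    · rw [dif_neg hi1]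
      rw [fwd_run A i h0]
      have e1 : runEnd A nn i = i + 1 := by
        rw [runEnd, dif_pos ⟨hilt, h0⟩, runEnd, dif_neg (by omega)]
      rw [e1]
      push_cast
      ring

-- A's port, assembled: the result is the backward-pass value at each index
theorem createoracle_eq_bwd (A : List Int) (nn : Nat) (hlen : A.length = nn + 1)
    (hlast : A.getD nn 0 ≠ 0) :
    createoracle A = (List.range nn).map (bwd A nn) := by
  have hInt : (A.length : Int) - 1 = (nn : Int) := by rw [hlen]; push_cast; ring
  have hInt2 : (A.length : Int) - 2 = (nn : Int) - 1 := by rw [hlen]; push_cast; ring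
  simp only [createoracle]
  rw [phase1 A nn hlen, hInt, hInt2]
  rcases Nat.eq_zero_or_pos nn with h0 | hpos
  · subst h0
    rw [show ((0 : Nat) : Int) = 0 from rfl]
    rw [PySem.List.pyRange_one_eq_nil (by norm_num)]
    simp only [List.foldl_nil]
    rw [PySem.List.pyRange_neg_one_eq_nil (by norm_num)]
    simp only [List.reverse_nil, List.foldl_nil]
    have : mixF A 0 0 = [] := by simp [mixF]
    rw [this]
    by_cases hc : PySem.List.pyGetD A (0 : Int) 0 = 0
    · rw [if_pos hc]
      rfl
    · rw [if_neg hc]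
      rfl
  · rw [show ((nn : Int)) = ((nn - 1 : Nat) : Int) + 1 by omega]
    rw [fold_fwd A nn (nn - 1) (by omega)]
    rw [show (((nn - 1 : Nat) : Int) + 1) = ((nn : Nat) : Int) by omega]
    have hmix : mixF A nn (nn - 1) = (List.range nn).map (fwd A) := by
      unfold mixF
      refine List.map_congr_left (fun j hj => ?_)
      rw [List.mem_range] at hj
      rw [if_pos (by omega)]
    rw [hmix]
    rw [if_neg (by simpa using hlast)]
    rw [PySem.List.pyRange_neg_one_eq_reverse]
    rw [show ((-1 : Int) + 1) = ((0 : Nat) : Int) from rfl,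
      show ((nn : Int) - 1 + 1) = ((nn : Nat) : Int) by ring]
    rw [fold_bwd A nn hlast nn 0 (by omega)]
    unfold mixB
    refine List.map_congr_left (fun j hj => ?_)
    rw [if_pos (Nat.zero_le j)]

theorem alt_eq (A : List Int) (nn : Nat) (hlen : A.length = nn + 1) :
    createoracle_alt A = (List.range nn).map (fun i =>
      if A.getD i 0 ≠ 0 then 0 else (runEnd A nn i : Int) - (runStart A i : Int)) := by
  simp [createoracle_alt, hlen]

-- ===== VERDICT (by name: the statement is the Claim_ definition above) =====
theorem createoracle_spec : Claim_equal_createoracle := by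
  intro A _ hpre
  obtain ⟨hne, hlast⟩ := hpre
  obtain ⟨nn, hlen⟩ : ∃ nn, A.length = nn + 1 := by
    cases A with
    | nil => exact absurd rfl hne
    | cons a l => exact ⟨l.length, rfl⟩
  have hlast' : A.getD nn 0 ≠ 0 := by
    intro hz
    apply hlast
    have hnn : nn < A.length := by omega
    rw [List.getLast?_eq_getElem?, hlen, Nat.add_sub_cancel]
    rw [List.getElem?_eq_getElem hnn]
    rw [List.getD_eq_getElem?_getD, List.getElem?_eq_getElem hnn] at hz
    simp only [Option.getD_some] at hz
    rw [hz]
  show createoracle A = createoracle_alt A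
  rw [createoracle_eq_bwd A nn hlen hlast', alt_eq A nn hlen]
  refine List.map_congr_left (fun j hj => ?_)
  rw [List.mem_range] at hj
  by_cases hz : A.getD j 0 = 0
  · rw [if_neg (not_not_intro hz)]
    exact bwd_run A nn hlast' (nn - j) j (by omega) hj hz
  · rw [if_pos hz]
    exact bwd_of_ne A nn j hz
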